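-- pv_equiv track=rewrite | github.com/ValikVasilkovskiy/Checkio_Task_Elementary | The_end_of_other.py | end_with
-- ===== SOURCE A (Python) =====
-- def end_with(words_set):
--     temp_stack = list(words_set)
--     for i in words_set:
--         # del i-element
--         temp_stack.remove(i)
--         # list without i-element
--         for j in temp_stack:
--             if j.endswith(i):
--                 return True
--         # add i-element in list
--         temp_stack.append(i)
--     return False
-- ===== SOURCE B (Python) =====
-- def end_with(words_set):
--     seen = set()
--     for w in words_set:
--         if w in seen:
--             return True
--         seen.add(w)
--     for w in seen:
--         for k in range(1, len(w) + 1):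
--             if w[k:] in seen:
--                 return True
--     return False
-- ===== Notes on version B (the rewrite author's own statement) =====
-- stated objective: alternative
-- what changed: Replaced A's nested scan (for each word, linearly scan all remaining words testing endswith) by a set of the words: one pass detects duplicates, then each word's proper suffixes are probed in the set, so the inner scan over the whole list disappears.
import Mathlib
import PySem

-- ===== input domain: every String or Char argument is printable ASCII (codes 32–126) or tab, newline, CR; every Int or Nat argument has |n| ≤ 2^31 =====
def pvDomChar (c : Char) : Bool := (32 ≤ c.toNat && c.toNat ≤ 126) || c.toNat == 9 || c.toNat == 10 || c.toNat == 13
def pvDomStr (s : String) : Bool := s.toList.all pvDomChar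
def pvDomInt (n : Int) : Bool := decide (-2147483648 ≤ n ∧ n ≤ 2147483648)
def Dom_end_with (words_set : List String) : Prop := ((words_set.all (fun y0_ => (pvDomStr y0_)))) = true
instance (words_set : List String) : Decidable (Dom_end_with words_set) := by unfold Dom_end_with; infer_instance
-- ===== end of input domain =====

-- B replaces A's quadratic all-pairs endswith scan by a hash set of the words probed with each word's proper suffixes (plus an early duplicate check); same return value.

-- ===== PORT A =====
-- outer loop of A: `rest` is the part of words_set not yet processed, `stack` is temp_stack
def end_with_go (rest : List String) (stack : List String) : Bool :=
  match rest with
  | [] => false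
  | i :: rest' =>
    match PySem.List.remove? stack i with
    | none => false  -- Python would raise ValueError here; unreachable (i is always in temp_stack)
    | some stack' =>
      if stack'.any (fun j => PySem.Str.endswith j i) then true
      else end_with_go rest' (stack' ++ [i])

def end_with (words_set : List String) : Bool :=
  end_with_go words_set words_set

-- ===== PORT B =====
-- first loop of B: build `seen`, returning none = early `return True` on a duplicate
def end_with_alt_dedup (ws : List String) (seen : PySem.Set String) : Option (PySem.Set String) :=
  match ws with
  | [] => some seen
  | w :: ws' =>
    if PySem.Set.contains seen w then none
    else end_with_alt_dedup ws' (PySem.Set.add seen w)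

def end_with_alt (words_set : List String) : Bool :=
  match end_with_alt_dedup words_set PySem.Set.empty with
  | none => true
  | some seen =>
    -- `for w in seen: for k in range(1, len(w)+1): if w[k:] in seen: return True`
    -- (iterates a Python set; the result of `any` does not depend on the iteration order)
    seen.any (fun w =>
      (PySem.List.pyRange 1 ((w.length : Int) + 1) 1).any (fun k =>
        PySem.Set.contains seen (String.ofList (PySem.List.slice w.toList (some k) none))))

-- ===== PRECONDITION & SPEC =====
def Spec_end_with (words_set : List String) (out : Bool) : Prop := out = end_with_alt words_set
instance (words_set : List String) (out : Bool) : Decidable (Spec_end_with words_set out) := by unfold Spec_end_with; infer_instance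

-- ===== CLAIM (what is proved, stated in full; the proofs are below) =====
def Claim_equal_end_with : Prop := ∀ (words_set : List String), Dom_end_with words_set → Spec_end_with words_set (end_with words_set)

-- ===== LEMMAS AND PROOFS =====

theorem endswith_iff (j i : String) :
    PySem.Str.endswith j i = true ↔ i.toList <:+ j.toList := by
  simp [PySem.Str.endswith_eq, PySem.Chars.endswith_iff]

-- A's loop returns true iff some still-unprocessed i has a match in temp_stack minus one copy of i
theorem end_with_go_iff (W : List String) :
    ∀ (rest stack : List String), stack.Perm W → (∀ i ∈ rest, i ∈ W) →
      (end_with_go rest stack = true ↔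
        ∃ i ∈ rest, ∃ j ∈ W.erase i, i.toList <:+ j.toList) := by
  intro rest
  induction rest with
  | nil => intro stack _ _; simp [end_with_go]
  | cons i rest' ih =>
    intro stack hperm hmem
    have hiW : i ∈ W := hmem i (by simp)
    have hist : i ∈ stack := hperm.symm.subset hiW
    have hrm : PySem.List.remove? stack i = some (stack.erase i) :=
      PySem.List.remove?_eq_some_erase stack i hist
    have hperm' : (stack.erase i).Perm (W.erase i) := hperm.erase i
    by_cases hany : (stack.erase i).any (fun j => PySem.Str.endswith j i) = true
    · have hstep : end_with_go (i :: rest') stack = true := by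
        simp only [end_with_go, hrm]
        rw [if_pos hany]
      rw [hstep]
      simp only [true_iff]
      rcases List.any_eq_true.mp hany with ⟨j, hj, hjs⟩
      exact ⟨i, by simp, j, hperm'.subset hj, (endswith_iff j i).mp hjs⟩
    · have hperm2 : (stack.erase i ++ [i]).Perm W :=
        ((List.perm_append_singleton i _).trans (List.perm_cons_erase hist).symm).trans hperm
      have hrec := ih (stack.erase i ++ [i]) hperm2 (fun x hx => hmem x (by simp [hx]))
      have hstep : end_with_go (i :: rest') stack = end_with_go rest' (stack.erase i ++ [i]) := by
        simp only [end_with_go, hrm]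
        rw [if_neg hany]
      rw [hstep, hrec]
      constructor
      · rintro ⟨a, ha, hrest⟩; exact ⟨a, by simp [ha], hrest⟩
      · rintro ⟨a, ha, j, hj, hsuf⟩
        rcases List.mem_cons.mp ha with rfl | ha'
        · exfalso
          apply hany
          exact List.any_eq_true.mpr ⟨j, hperm'.symm.subset hj, (endswith_iff j a).mpr hsuf⟩
        · exact ⟨a, ha', j, hj, hsuf⟩

-- B's first loop: completes with all elements added iff no duplicate was met
theorem dedup_eq_some (ws : List String) :
    ∀ (seen : PySem.Set String), ws.Nodup → (∀ w ∈ ws, w ∉ seen) →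
      end_with_alt_dedup ws seen = some (ws.foldl PySem.Set.add seen) := by
  induction ws with
  | nil => intro seen _ _; rfl
  | cons w ws' ih =>
    intro seen hnd hdis
    have hw : w ∉ seen := hdis w (by simp)
    have hc : PySem.Set.contains seen w = false := by
      simp [PySem.Set.contains, hw]
    have hstep : end_with_alt_dedup (w :: ws') seen = end_with_alt_dedup ws' (PySem.Set.add seen w) := by
      simp only [end_with_alt_dedup]
      rw [if_neg (by rw [hc]; exact Bool.false_ne_true)]
    rw [hstep, List.foldl_cons]
    exact ih _ hnd.of_cons (by
      intro x hx
      rw [PySem.Set.mem_add]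
      push Not
      exact ⟨hdis x (by simp [hx]), fun h => (List.nodup_cons.mp hnd).1 (h ▸ hx)⟩)

theorem dedup_eq_none (ws : List String) :
    ∀ (seen : PySem.Set String), (¬ ws.Nodup ∨ ∃ w ∈ ws, w ∈ seen) →
      end_with_alt_dedup ws seen = none := by
  induction ws with
  | nil => intro seen h; rcases h with h | ⟨w, hw, _⟩ <;> simp_all
  | cons w ws' ih =>
    intro seen h
    by_cases hc : PySem.Set.contains seen w = true
    · simp only [end_with_alt_dedup]
      rw [if_pos hc]
    · have hw : w ∉ seen := by
        simpa [PySem.Set.contains] using hc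
      have hstep : end_with_alt_dedup (w :: ws') seen = end_with_alt_dedup ws' (PySem.Set.add seen w) := by
        simp only [end_with_alt_dedup]
        rw [if_neg hc]
      rw [hstep]
      apply ih
      rcases h with h | ⟨x, hx, hxs⟩
      · rw [List.nodup_cons] at h
        push Not at h
        by_cases hm : w ∈ ws'
        · exact Or.inr ⟨w, hm, by rw [PySem.Set.mem_add]; exact Or.inr rfl⟩
        · exact Or.inl (h hm)
      · rcases List.mem_cons.mp hx with rfl | hx'
        · exact absurd hxs hw
        · exact Or.inr ⟨x, hx', by rw [PySem.Set.mem_add]; exact Or.inl hxs⟩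

theorem foldl_add_empty_eq_ofList (ws : List String) :
    ws.foldl PySem.Set.add PySem.Set.empty = PySem.Set.ofList ws := by
  rw [PySem.Set.ofList_eq_foldl]; rfl

-- B returns true iff there is a duplicate or some word's proper suffix is itself a word
theorem end_with_alt_iff (W : List String) :
    end_with_alt W = true ↔
      (¬ W.Nodup ∨ ∃ w ∈ W, ∃ k : Nat, 1 ≤ k ∧ k ≤ w.length ∧
        String.ofList (w.toList.drop k) ∈ W) := by
  by_cases hnd : W.Nodup
  · have hsome := dedup_eq_some W PySem.Set.empty hnd (by intro w _; simp [PySem.Set.empty])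
    rw [foldl_add_empty_eq_ofList] at hsome
    simp only [end_with_alt, hsome, hnd, not_true_eq_false, false_or]
    rw [List.any_eq_true]
    constructor
    · rintro ⟨w, hw, hk⟩
      rcases List.any_eq_true.mp hk with ⟨k, hkmem, hks⟩
      rw [PySem.List.mem_pyRange_one] at hkmem
      obtain ⟨hk1, hk2⟩ := hkmem
      have hknn : 0 ≤ k := by omega
      rw [PySem.List.slice_from w.toList hknn] at hks
      have hlw : w.toList.length = w.length := String.length_toList
      refine ⟨w, (PySem.Set.mem_ofList W w).mp hw, k.toNat, by omega, by omega, ?_⟩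
      have : String.ofList (w.toList.drop k.toNat) ∈ PySem.Set.ofList W := by
        simpa [PySem.Set.contains, List.contains_eq_mem] using hks
      exact (PySem.Set.mem_ofList W _).mp this
    · rintro ⟨w, hw, k, hk1, hk2, hmem⟩
      refine ⟨w, (PySem.Set.mem_ofList W w).mpr hw, List.any_eq_true.mpr ⟨(k : Int), ?_, ?_⟩⟩
      · rw [PySem.List.mem_pyRange_one]
        constructor
        · exact_mod_cast hk1
        · have hlw : w.toList.length = w.length := String.length_toList
          omega
      · rw [PySem.List.slice_from w.toList (by positivity)]
        simp only [Int.toNat_natCast]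
        simp [PySem.Set.contains, List.contains_eq_mem, (PySem.Set.mem_ofList W _).mpr hmem]
  · have hnone : end_with_alt_dedup W ([] : PySem.Set String) = none :=
      dedup_eq_none W PySem.Set.empty (Or.inl hnd)
    simp [end_with_alt, hnone, hnd]

-- the two characterisations agree
theorem bridge (W : List String) :
    (∃ i ∈ W, ∃ j ∈ W.erase i, i.toList <:+ j.toList) ↔
      (¬ W.Nodup ∨ ∃ w ∈ W, ∃ k : Nat, 1 ≤ k ∧ k ≤ w.length ∧
        String.ofList (w.toList.drop k) ∈ W) := by
  constructor
  · rintro ⟨i, hi, j, hj, hsuf⟩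
    by_cases hij : i = j
    · subst hij
      left
      intro hnd
      exact ((List.Nodup.mem_erase_iff hnd).mp hj).1 rfl
    · right
      obtain ⟨t, ht⟩ := hsuf
      have hjW : j ∈ W := List.mem_of_mem_erase hj
      refine ⟨j, hjW, t.length, ?_, ?_, ?_⟩
      · rcases Nat.eq_zero_or_pos t.length with h0 | h1
        · exfalso
          apply hij
          have : t = [] := List.eq_nil_of_length_eq_zero h0
          subst this
          simp at ht
          exact (String.toList_inj.mp ht.symm).symm
        · exact h1
      · have := congrArg List.length ht
        simp only [List.length_append, String.length_toList] at this ⊢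
        omega
      · have hdrop : j.toList.drop t.length = i.toList := by
          rw [← ht]; simp
        rw [hdrop]
        simpa using hi
  · rintro (hnd | ⟨w, hw, k, hk1, hk2, hmem⟩)
    · rw [List.nodup_iff_count_le_one] at hnd
      push Not at hnd
      obtain ⟨a, ha⟩ := hnd
      have haW : a ∈ W := by
        rw [← List.count_pos_iff]; omega
      have haE : a ∈ W.erase a := by
        rw [← List.count_pos_iff, List.count_erase_self]
        omega
      exact ⟨a, haW, a, haE, List.suffix_refl _⟩
    · set s := String.ofList (w.toList.drop k) with hs
      have hslen : s.toList.length = w.toList.length - k := by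
        simp [hs]
      have hlw : w.toList.length = w.length := String.length_toList
      have hne : w ≠ s := by
        intro h
        have : s.toList.length = w.toList.length := by rw [h]
        omega
      refine ⟨s, hmem, w, (List.mem_erase_of_ne hne).mpr hw, ?_⟩
      have : s.toList = w.toList.drop k := by simp [hs]
      rw [this]
      exact List.drop_suffix k w.toList

-- ===== VERDICT (by name: the statement is the Claim_ definition above) =====
theorem end_with_spec : Claim_equal_end_with := by
  intro W _
  unfold Spec_end_with
  rw [Bool.eq_iff_iff]
  rw [end_with, end_with_go_iff W W W (List.Perm.refl W) (fun _ h => h),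
    end_with_alt_iff W]
  exact bridge W
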